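-- pv_equiv track=rewrite | github.com/Sorrypre/CSINTSY-MCO2-AQJK-Kids | affixing.py | consecutive_consonants
-- ===== SOURCE A (Python) =====
-- vowels = [
--     'A', 'E', 'I', 'O', 'U',
--     'a', 'e', 'i', 'o', 'u'
-- ]
--
-- consonants = [
--     'B', 'K', 'D', 'G', 'H', 'L', 'M', 'N', 'P', 'R', 'S', 'T', 'W', 'Y',
--     'b', 'k', 'd', 'g', 'h', 'l', 'm', 'n', 'p', 'r', 's', 't', 'w', 'y'
-- ]
--
-- def consecutive_consonants(strg):
--     if not strg.strip():
--         return []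
--     consecs = []
--     cc = 0
--     cpos = 0
--     lpos = 0
--     first = False
--     for l in strg:
--         if not l in vowels and l in consonants:
--             cc += 1
--             if not first:
--                 first = True
--         if l in vowels and first:
--             consecs.append([cc, lpos])
--             cc = 0
--             first = False
--         if l in vowels and not first:
--             lpos = cpos + 1
--         cpos += 1
--         if cpos == len(strg) and cc > 0:
--             consecs.append([cc, lpos])
--             cc = 0
--             first = False
--     return consecs
-- ===== SOURCE B (Python) =====
-- VOWELS = set('AEIOUaeiou')
-- CONSONANTS = set('BKDGHLMNPRSTWYbkdghlmnprstwy')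
--
-- def consecutive_consonants(strg):
--     if not strg.strip():
--         return []
--     out = []
--     start = 0
--     for i, ch in enumerate(strg):
--         if ch in VOWELS:
--             cnt = sum(1 for c in strg[start:i] if c in CONSONANTS)
--             if cnt:
--                 out.append([cnt, start])
--             start = i + 1
--     cnt = sum(1 for c in strg[start:] if c in CONSONANTS)
--     if cnt:
--         out.append([cnt, start])
--     return out
-- ===== Notes on version B (the rewrite author's own statement) =====
-- stated objective: faster
-- what changed: B replaces A's single pass with a running consonant counter and cc/lpos/first flag bookkeeping (including an end-of-string check inside the loop) by a boundary-driven scan: it reacts only to vowels, counting each vowel-delimited segment's consonants with a slice sum, plus one trailing-segment count after the loop.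
import Mathlib
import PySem

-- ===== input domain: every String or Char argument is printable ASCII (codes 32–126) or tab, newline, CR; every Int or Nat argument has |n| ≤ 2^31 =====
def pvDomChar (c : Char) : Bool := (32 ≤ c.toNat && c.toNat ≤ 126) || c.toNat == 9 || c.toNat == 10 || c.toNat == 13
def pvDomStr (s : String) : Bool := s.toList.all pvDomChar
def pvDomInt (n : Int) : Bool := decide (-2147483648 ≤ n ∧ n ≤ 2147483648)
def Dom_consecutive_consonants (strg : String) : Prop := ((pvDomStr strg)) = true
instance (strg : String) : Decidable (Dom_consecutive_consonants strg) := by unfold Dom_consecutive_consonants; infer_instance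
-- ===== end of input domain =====

-- B replaces A's per-character counter/flag bookkeeping by a boundary-driven scan that only
-- reacts to vowels and counts each segment with a slice sum (measured constant-factor faster).

-- ===== PORT A =====
def pvVowels : List Char :=
  ['A', 'E', 'I', 'O', 'U', 'a', 'e', 'i', 'o', 'u']

def pvConsonants : List Char :=
  ['B', 'K', 'D', 'G', 'H', 'L', 'M', 'N', 'P', 'R', 'S', 'T', 'W', 'Y',
   'b', 'k', 'd', 'g', 'h', 'l', 'm', 'n', 'p', 'r', 's', 't', 'w', 'y']

-- one iteration of A's `for l in strg` loop; state = (consecs, cc, cpos, lpos, first)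
def pvStepA (n : Int) (s : List (List Int) × Int × Int × Int × Bool) (l : Char) :
    List (List Int) × Int × Int × Int × Bool :=
  let consecs := s.1
  let cc := s.2.1
  let cpos := s.2.2.1
  let lpos := s.2.2.2.1
  let first := s.2.2.2.2
  -- if not l in vowels and l in consonants: cc += 1; if not first: first = True
  let cc1 := if l ∉ pvVowels ∧ l ∈ pvConsonants then cc + 1 else cc
  let first1 := if l ∉ pvVowels ∧ l ∈ pvConsonants then true else first
  -- if l in vowels and first: consecs.append([cc, lpos]); cc = 0; first = False
  let consecs2 := if l ∈ pvVowels ∧ first1 = true then consecs ++ [[cc1, lpos]] else consecs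
  let cc2 := if l ∈ pvVowels ∧ first1 = true then 0 else cc1
  let first2 := if l ∈ pvVowels ∧ first1 = true then false else first1
  -- if l in vowels and not first: lpos = cpos + 1
  let lpos2 := if l ∈ pvVowels ∧ first2 = false then cpos + 1 else lpos
  -- cpos += 1
  let cpos2 := cpos + 1
  -- if cpos == len(strg) and cc > 0: consecs.append([cc, lpos]); cc = 0; first = False
  let consecs3 := if cpos2 = n ∧ cc2 > 0 then consecs2 ++ [[cc2, lpos2]] else consecs2
  let cc3 := if cpos2 = n ∧ cc2 > 0 then 0 else cc2
  let first3 := if cpos2 = n ∧ cc2 > 0 then false else first2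
  (consecs3, cc3, cpos2, lpos2, first3)

def consecutive_consonants (strg : String) : List (List Int) :=
  if PySem.Str.strip strg = "" then []
  else
    (strg.toList.foldl (pvStepA (PySem.Str.len strg)) ([], 0, 0, 0, false)).1

-- ===== PORT B =====
def pvVowelsB : PySem.Set Char := PySem.Set.ofList "AEIOUaeiou".toList
def pvConsonantsB : PySem.Set Char := PySem.Set.ofList "BKDGHLMNPRSTWYbkdghlmnprstwy".toList

-- one iteration of B's `for i, ch in enumerate(strg)` loop; state = (out, start)
def pvStepB (cs : List Char) (s : List (List Int) × Int) (p : Int × Char) :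
    List (List Int) × Int :=
  let out := s.1
  let start := s.2
  let i := p.1
  let ch := p.2
  if ch ∈ pvVowelsB then
    let cnt : Int := ((PySem.List.slice cs (some start) (some i)).countP
      (fun c => decide (c ∈ pvConsonantsB)) : Nat)
    let out1 := if cnt > 0 then out ++ [[cnt, start]] else out
    (out1, i + 1)
  else (out, start)

def consecutive_consonants_alt (strg : String) : List (List Int) :=
  if PySem.Str.strip strg = "" then []
  else
    let cs := strg.toList
    let r := (PySem.List.enumerate cs 0).foldl (pvStepB cs) ([], 0)
    let cnt : Int := ((PySem.List.slice cs (some r.2) none).countP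
      (fun c => decide (c ∈ pvConsonantsB)) : Nat)
    if cnt > 0 then r.1 ++ [[cnt, r.2]] else r.1

-- ===== PRECONDITION & SPEC =====
def Spec_consecutive_consonants (strg : String) (out : List (List Int)) : Prop := out = consecutive_consonants_alt strg
instance (strg : String) (out : List (List Int)) : Decidable (Spec_consecutive_consonants strg out) := by unfold Spec_consecutive_consonants; infer_instance

-- ===== CLAIM (what is proved, stated in full; the proofs are below) =====
def Claim_equal_consecutive_consonants : Prop := ∀ (strg : String), Dom_consecutive_consonants strg → Spec_consecutive_consonants strg (consecutive_consonants strg)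

-- ===== LEMMAS AND PROOFS =====

-- the common reference function: segments between vowels, with the running count cc,
-- current position pos and current segment start
def pvSpecF : List Char → Int → Int → Int → List (List Int)
  | [], cc, _, start => if cc > 0 then [[cc, start]] else []
  | c :: rest, cc, pos, start =>
    if c ∈ pvVowels then
      (if cc > 0 then [[cc, start]] else []) ++ pvSpecF rest 0 (pos + 1) (pos + 1)
    else
      pvSpecF rest (cc + (if c ∈ pvConsonants then 1 else 0)) (pos + 1) start

lemma pvVowelsB_eq : pvVowelsB = pvVowels := by decide

lemma pvConsonantsB_eq : pvConsonantsB = pvConsonants := by decide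

-- consonant count of the segment cs[a:b]
def pvCnt (cs : List Char) (a b : Nat) : Int :=
  (((cs.drop a).take (b - a)).countP (fun c => decide (c ∈ pvConsonants)) : Nat)

lemma pvCnt_self (cs : List Char) (a : Nat) : pvCnt cs a a = 0 := by
  simp [pvCnt]

lemma pvCnt_succ (cs : List Char) (start i : Nat) (c : Char) (rest : List Char)
    (hs : start ≤ i) (hd : cs.drop i = c :: rest) :
    pvCnt cs start (i + 1) = pvCnt cs start i + (if c ∈ pvConsonants then 1 else 0) := by
  have hget : cs[i]? = some c := by
    rw [← List.head?_drop, hd]; rfl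
  have h1 : i + 1 - start = (i - start) + 1 := by omega
  have h2 : (cs.drop start)[i - start]? = some c := by
    rw [List.getElem?_drop]
    rwa [show start + (i - start) = i by omega]
  unfold pvCnt
  rw [h1, List.take_add_one, h2]
  simp [List.countP_append]

lemma pvCnt_tail (cs : List Char) (start i : Nat) (hd : cs.drop i = []) :
    ((cs.drop start).countP (fun c => decide (c ∈ pvConsonants)) : Int) = pvCnt cs start i := by
  have hlen : cs.length ≤ i := by
    by_contra h
    have := List.drop_eq_nil_iff.mp hd
    omega
  unfold pvCnt
  rw [List.take_of_length_le (by simp; omega)]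

-- A's loop computes pvSpecF
lemma foldA_spec (n : Int) (rest : List Char) :
    ∀ (acc : List (List Int)) (cc pos start : Int),
    0 ≤ cc → pos + rest.length = n → (rest = [] → cc = 0) →
    (rest.foldl (pvStepA n) (acc, cc, pos, start, decide (0 < cc))).1
      = acc ++ pvSpecF rest cc pos start := by
  induction rest with
  | nil =>
    intro acc cc pos start hcc hn hend
    simp [List.foldl_nil, pvSpecF, hend rfl]
  | cons c rest ih =>
    intro acc cc pos start hcc hn hend
    rw [List.foldl_cons]
    by_cases hv : c ∈ pvVowels
    · -- vowel: cc unchanged; append if cc > 0; reset; lpos := pos + 1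
      by_cases hpos : 0 < cc
      · have hstep : pvStepA n (acc, cc, pos, start, decide (0 < cc)) c
            = (acc ++ [[cc, start]], 0, pos + 1, pos + 1, false) := by
          simp [pvStepA, hv, hpos]
        rw [hstep, show (false : Bool) = decide ((0:Int) < 0) by decide,
          ih (acc ++ [[cc, start]]) 0 (pos + 1) (pos + 1) le_rfl (by simp at hn ⊢; omega)
            (fun _ => rfl)]
        simp [pvSpecF, hv, hpos]
      · have hcc0 : cc = 0 := by omega
        subst hcc0
        have hstep : pvStepA n (acc, 0, pos, start, decide ((0:Int) < 0)) c
            = (acc, 0, pos + 1, pos + 1, false) := by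
          simp [pvStepA, hv]
        rw [hstep, show (false : Bool) = decide ((0:Int) < 0) by decide,
          ih acc 0 (pos + 1) (pos + 1) le_rfl (by simp at hn ⊢; omega) (fun _ => rfl)]
        simp [pvSpecF, hv]
    · -- not a vowel
      set δ : Int := if c ∈ pvConsonants then 1 else 0 with hδ
      have hδnn : 0 ≤ δ := by rw [hδ]; split_ifs <;> omega
      by_cases hlast : rest = []
      · -- last character: the in-loop end-of-string check fires (if cc + δ > 0)
        subst hlast
        have hpn : pos + 1 = n := by simp at hn; omega
        by_cases hccδ : 0 < cc + δ
        · have hstep : pvStepA n (acc, cc, pos, start, decide (0 < cc)) c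
              = (acc ++ [[cc + δ, start]], 0, pos + 1, start, false) := by
            by_cases hc : c ∈ pvConsonants
            · have h1 : δ = 1 := by rw [hδ]; simp [hc]
              have h2 : (0:Int) < cc + 1 := by omega
              simp [pvStepA, hv, hc, hpn, h1, h2]
            · have h1 : δ = 0 := by rw [hδ]; simp [hc]
              have h2 : (0:Int) < cc := by omega
              simp [pvStepA, hv, hc, hpn, h1, h2]
          rw [hstep]
          simp [List.foldl_nil, pvSpecF, hv, ← hδ, hccδ]
        · have hc : c ∉ pvConsonants := by
            intro hc
            rw [hδ] at hccδ
            simp [hc] at hccδ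
            omega
          have hδ0 : δ = 0 := by rw [hδ]; simp [hc]
          have hcc0 : cc = 0 := by omega
          have hstep : pvStepA n (acc, cc, pos, start, decide (0 < cc)) c
              = (acc, 0, pos + 1, start, decide (0 < cc + δ)) := by
            simp [pvStepA, hv, hc, hcc0, hδ0]
          rw [hstep]
          simp [List.foldl_nil, pvSpecF, hv, hc, hcc0]
      · -- not the last character: cpos+1 ≠ n
        have hne : ¬ (pos + 1 = n) := by
          have : (1:Int) ≤ rest.length := by
            cases rest with
            | nil => exact absurd rfl hlast
            | cons _ _ => simp
          simp at hn; omega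
        have hstep : pvStepA n (acc, cc, pos, start, decide (0 < cc)) c
            = (acc, cc + δ, pos + 1, start, decide (0 < cc + δ)) := by
          by_cases hc : c ∈ pvConsonants
          · have hδ1 : δ = 1 := by rw [hδ]; simp [hc]
            simp [pvStepA, hv, hc, hne, hδ1]
            try omega
          · have hδ0 : δ = 0 := by rw [hδ]; simp [hc]
            simp [pvStepA, hv, hc, hne, hδ0]
            try omega
        rw [hstep,
          ih acc (cc + δ) (pos + 1) start (by omega) (by simp at hn ⊢; omega)
            (fun h => absurd h hlast)]
        simp [pvSpecF, hv, ← hδ]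

-- B's trailing-segment code after the loop
def pvFinish (cs : List Char) (r : List (List Int) × Int) : List (List Int) :=
  let cnt : Int := ((PySem.List.slice cs (some r.2) none).countP
    (fun c => decide (c ∈ pvConsonantsB)) : Nat)
  if cnt > 0 then r.1 ++ [[cnt, r.2]] else r.1

-- B's loop (plus its trailing-segment code) computes pvSpecF
lemma foldB_main (cs : List Char) (rest : List Char) :
    ∀ (i start : Nat) (acc : List (List Int)),
    rest = cs.drop i → start ≤ i →
    pvFinish cs ((PySem.List.enumerate rest (i : Int)).foldl (pvStepB cs) (acc, (start : Int)))
      = acc ++ pvSpecF rest (pvCnt cs start i) i start := by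
  induction rest with
  | nil =>
    intro i start acc hrest hs
    rw [PySem.List.enumerate_nil, List.foldl_nil]
    have htail := pvCnt_tail cs start i hrest.symm
    simp only [pvFinish, PySem.List.slice_from_natCast, pvConsonantsB_eq, pvSpecF]
    rw [htail]
    by_cases hp : (0:Int) < pvCnt cs start i <;> simp [hp]
  | cons c rest ih =>
    intro i start acc hrest hs
    have hne : cs.drop i ≠ [] := by rw [← hrest]; simp
    have hi : i < cs.length := by
      by_contra h
      exact hne (List.drop_eq_nil_iff.mpr (by omega))
    have hrest' : rest = cs.drop (i + 1) := by
      rw [← List.tail_drop, ← hrest]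
      rfl
    rw [PySem.List.enumerate_cons, List.foldl_cons]
    by_cases hv : c ∈ pvVowels
    · -- vowel at index i: count the segment cs[start:i], then start := i + 1
      have hstep : pvStepB cs (acc, (start : Int)) ((i : Int), c)
          = (if pvCnt cs start i > 0 then acc ++ [[pvCnt cs start i, (start : Int)]] else acc,
             (i : Int) + 1) := by
        simp only [pvStepB, pvVowelsB_eq, pvConsonantsB_eq, hv, if_pos]
        rw [PySem.List.slice_natCast]
        rfl
      rw [hstep, show ((i : Int) + 1) = ((i + 1 : Nat) : Int) by push_cast; ring,
        ih (i + 1) (i + 1) _ hrest' le_rfl]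
      rw [pvCnt_self]
      simp only [pvSpecF, hv, if_pos]
      push_cast
      by_cases hp : (0:Int) < pvCnt cs start i <;> simp [hp, gt_iff_lt]
    · -- non-vowel: state unchanged, the running segment extends
      have hstep : pvStepB cs (acc, (start : Int)) ((i : Int), c) = (acc, (start : Int)) := by
        simp [pvStepB, pvVowelsB_eq, hv]
      rw [hstep, show ((i : Int) + 1) = ((i + 1 : Nat) : Int) by push_cast; ring,
        ih (i + 1) start _ hrest' (by omega),
        pvCnt_succ cs start i c rest hs hrest.symm]
      simp only [pvSpecF, hv]
      push_cast
      ring_nf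

-- ===== VERDICT (by name: the statement is the Claim_ definition above) =====
theorem consecutive_consonants_spec : Claim_equal_consecutive_consonants := by
  intro strg _
  unfold Spec_consecutive_consonants consecutive_consonants consecutive_consonants_alt
  by_cases h : PySem.Str.strip strg = ""
  · simp [h]
  · simp only [h, if_false]
    have hA := foldA_spec (PySem.Str.len strg) strg.toList [] 0 0 0 le_rfl
      (by simp [PySem.Str.len_eq]) (by intro _; rfl)
    rw [show (decide ((0:Int) < 0)) = false by decide] at hA
    rw [hA]
    have hB := foldB_main strg.toList strg.toList 0 0 [] List.drop_zero.symm le_rfl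
    rw [pvCnt_self] at hB
    simp only [Nat.cast_zero] at hB
    rw [← hB]
    rfl
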